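-- pv_equiv track=rewrite | github.com/road2gameday-tech/CollegeRecruiting | app.py | _derive_school_name
-- ===== SOURCE A (Python) =====
-- NAME_HINTS = (
--     "university", "college", "state", "tech", "institute", "polytechnic",
--     "community", "cc", "academy", "school"
-- )
--
-- def _derive_school_name(row):
--     """Heuristic: scan all values and pick the most school-like string."""
--     best = ""
--     for _, v in row.items():
--         val = str(v or "").strip()
--         if not val:
--             continue
--         low = val.lower()
--         if any(h in low for h in NAME_HINTS) and len(val) >= len(best):
--             if "@" in val or val.startswith("http"):
--                 continue
--             best = val
--     return best
-- ===== SOURCE B (Python) =====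
-- NAME_HINTS = (
--     "university", "college", "state", "tech", "institute", "polytechnic",
--     "community", "cc", "academy", "school"
-- )
--
-- def _derive_school_name(row):
--     """Sort-based selection: gather the qualifying values, stably sort them by
--     length (ascending), and take the last element; stability makes length ties
--     resolve to the latest occurrence, and '' is returned when nothing qualifies."""
--     cands = [val for v in row.values()
--              if (val := str(v or "").strip())
--              and any(h in val.lower() for h in NAME_HINTS)
--              and "@" not in val
--              and not val.startswith("http")]
--     ranked = sorted(cands, key=len)
--     return ranked[-1] if ranked else ""
-- ===== Notes on version B (the rewrite author's own statement) =====
-- stated objective: alternative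
-- what changed: A's single interleaved running-best loop (mutating `best` under an eligibility-and-length guard) is replaced by collecting the qualifying values and stably sorting them by length, returning the last element of the sorted list; stability of sorted() reproduces A's '>='-tie-to-last-occurrence rule.
import Mathlib
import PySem

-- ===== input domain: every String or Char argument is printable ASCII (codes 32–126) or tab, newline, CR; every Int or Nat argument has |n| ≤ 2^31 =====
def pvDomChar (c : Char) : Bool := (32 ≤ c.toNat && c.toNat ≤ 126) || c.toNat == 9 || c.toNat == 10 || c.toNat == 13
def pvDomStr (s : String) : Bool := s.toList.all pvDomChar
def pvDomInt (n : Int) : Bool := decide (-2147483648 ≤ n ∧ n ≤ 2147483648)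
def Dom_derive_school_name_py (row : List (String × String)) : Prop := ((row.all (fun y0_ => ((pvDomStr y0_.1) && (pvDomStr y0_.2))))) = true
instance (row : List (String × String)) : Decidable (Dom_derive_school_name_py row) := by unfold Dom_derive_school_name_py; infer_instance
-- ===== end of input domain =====

-- B replaces A's interleaved running-best scan by collecting the qualifying
-- values and stably sorting them by length, returning the last element of the
-- sorted list (stability sends length ties to the last occurrence, as A's '>='
-- update does); objective: an alternative, sort-based selection.

def nameHints : List String :=
  ["university", "college", "state", "tech", "institute", "polytechnic",
   "community", "cc", "academy", "school"]

-- ===== PORT A =====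
def derive_school_name_py (row : List (String × String)) : String :=
  row.foldl (fun best kv =>
    let val := PySem.Str.strip kv.2
    if val = "" then best
    else
      let low := PySem.Str.lower val
      if nameHints.any (fun h => PySem.Str.isIn h low)
          && decide (PySem.Str.len best ≤ PySem.Str.len val) then
        if PySem.Str.isIn "@" val || PySem.Str.startswith val "http" then best
        else val
      else best) ""

-- ===== PORT B =====
-- B's filter predicate (the comprehension's condition in Source B).
def pvOk (val : String) : Bool :=
  !(val == "")
    && nameHints.any (fun h => PySem.Str.isIn h (PySem.Str.lower val))
    && !PySem.Str.isIn "@" val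
    && !PySem.Str.startswith val "http"

def derive_school_name_py_alt (row : List (String × String)) : String :=
  let cands := (row.map (fun kv => PySem.Str.strip kv.2)).filter pvOk
  let ranked := PySem.List.sorted cands PySem.Str.len
  if ranked = [] then "" else ranked.getLastD ""

-- ===== PRECONDITION & SPEC =====
def Spec_derive_school_name_py (row : List (String × String)) (out : String) : Prop := out = derive_school_name_py_alt row
instance (row : List (String × String)) (out : String) : Decidable (Spec_derive_school_name_py row out) := by unfold Spec_derive_school_name_py; infer_instance

-- ===== CLAIM (what is proved, stated in full; the proofs are below) =====
def Claim_equal_derive_school_name_py : Prop := ∀ (row : List (String × String)), Dom_derive_school_name_py row → Spec_derive_school_name_py row (derive_school_name_py row)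

-- ===== LEMMAS AND PROOFS =====

-- A's update step, isolated: replace best when the candidate is at least as long.
def pvUpd (b v : String) : String :=
  if PySem.Str.len b ≤ PySem.Str.len v then v else b

-- the insertion step of PySem.List.sorted with key PySem.Str.len
def pvIns (x : String) (ys : List String) : List String :=
  PySem.List.insertBy (fun a b => decide (PySem.Str.len a < PySem.Str.len b)) x ys

def pvLe (a b : String) : Prop := PySem.Str.len a ≤ PySem.Str.len b

-- A's loop body applies pvUpd exactly on the values pvOk accepts.
lemma pv_step_eq (b val : String) :
    (if val = "" then b
     else if nameHints.any (fun h => PySem.Str.isIn h (PySem.Str.lower val))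
              && decide (PySem.Str.len b ≤ PySem.Str.len val) then
            if PySem.Str.isIn "@" val || PySem.Str.startswith val "http" then b
            else val
          else b)
    = (if pvOk val then pvUpd b val else b) := by
  unfold pvOk pvUpd
  by_cases h0 : val = ""
  · subst h0; simp
  · rw [if_neg h0]
    cases h1 : nameHints.any (fun h => PySem.Str.isIn h (PySem.Str.lower val)) <;>
    cases h2 : PySem.Str.isIn "@" val <;>
    cases h3 : PySem.Str.startswith val "http" <;>
    by_cases h4 : PySem.Str.len b ≤ PySem.Str.len val <;>
      simp [h0]

-- A's whole loop is a fold of pvUpd over the pvOk-filtered stripped values.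
lemma pv_A_foldl (row : List (String × String)) : ∀ b : String,
    row.foldl (fun best kv =>
      let val := PySem.Str.strip kv.2
      if val = "" then best
      else
        let low := PySem.Str.lower val
        if nameHints.any (fun h => PySem.Str.isIn h low)
            && decide (PySem.Str.len best ≤ PySem.Str.len val) then
          if PySem.Str.isIn "@" val || PySem.Str.startswith val "http" then best
          else val
        else best) b
    = ((row.map (fun kv => PySem.Str.strip kv.2)).filter pvOk).foldl pvUpd b := by
  induction row with
  | nil => intro b; rfl
  | cons kv t ih =>
    intro b
    simp only [List.foldl_cons, List.map_cons, List.filter_cons]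
    rw [ih, pv_step_eq]
    by_cases hok : pvOk (PySem.Str.strip kv.2) = true <;> simp [hok]

-- insertion preserves the sorted-by-length invariant
lemma pv_ins_pairwise (x : String) (ys : List String)
    (h : ys.Pairwise pvLe) : (pvIns x ys).Pairwise pvLe := by
  induction ys with
  | nil => simp [pvIns, PySem.List.insertBy, pvLe]
  | cons y ys ih =>
    rw [List.pairwise_cons] at h
    obtain ⟨hy, hp⟩ := h
    unfold pvIns PySem.List.insertBy
    by_cases hlt : PySem.Str.len x < PySem.Str.len y
    · simp only [hlt, decide_true, if_true]
      refine List.Pairwise.cons ?_ (List.Pairwise.cons hy hp)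
      intro z hz
      rcases List.mem_cons.mp hz with rfl | hz
      · exact le_of_lt hlt
      · exact le_trans (le_of_lt hlt) (hy z hz)
    · simp only [hlt, decide_false]
      refine List.Pairwise.cons ?_ (ih hp)
      intro z hz
      rcases (PySem.List.mem_insertBy _ _ _ _).mp hz with rfl | hz
      · exact le_of_not_gt hlt
      · exact hy z hz

-- in a sorted list the head is ≤ the last element
lemma pv_head_le_last (ys : List String) : ∀ (y d : String),
    (y :: ys).Pairwise pvLe → pvLe y ((y :: ys).getLastD d) := by
  induction ys with
  | nil => intro y d _; exact le_refl _
  | cons a ys ih =>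
    intro y d h
    rw [List.pairwise_cons] at h
    obtain ⟨hy, hp⟩ := h
    have h2 := ih a d hp
    rw [List.getLastD_cons] at h2
    rw [List.getLastD_cons, List.getLastD_cons]
    exact le_trans (hy a (List.mem_cons_self ..)) h2

-- the last element of an insertion into a sorted list is A's update of the old last
lemma pv_getLastD_ins : ∀ (ys : List String), ys.Pairwise pvLe →
    ∀ (x d : String), PySem.Str.len d ≤ PySem.Str.len x →
    (pvIns x ys).getLastD d = pvUpd (ys.getLastD d) x := by
  intro ys
  induction ys with
  | nil =>
    intro _ x d hd
    unfold pvIns PySem.List.insertBy pvUpd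
    simp only [List.getLastD_nil]
    rw [if_pos hd]
    rfl
  | cons y ys ih =>
    intro h x d _
    rw [List.pairwise_cons] at h
    obtain ⟨hy, hp⟩ := h
    unfold pvIns PySem.List.insertBy
    by_cases hlt : PySem.Str.len x < PySem.Str.len y
    · rw [if_pos (decide_eq_true hlt)]
      have hlast := pv_head_le_last ys y d (List.Pairwise.cons hy hp)
      rw [List.getLastD_cons] at hlast
      simp only [List.getLastD_cons]
      unfold pvUpd
      rw [if_neg (not_le.mpr (lt_of_lt_of_le hlt hlast))]
    · rw [if_neg (by simp only [decide_eq_true_eq]; exact hlt)]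
      simp only [List.getLastD_cons]
      exact ih hp x y (le_of_not_gt hlt)

-- 0 ≤ len
lemma pv_len_nonneg (s : String) : 0 ≤ PySem.Str.len s := by
  simp [PySem.Str.len_eq]

-- fold of insertions vs fold of A's updates, through the last element
lemma pv_fold_ins (c : List String) : ∀ (acc : List String), acc.Pairwise pvLe →
    (c.foldl (fun a x => pvIns x a) acc).getLastD "" = c.foldl pvUpd (acc.getLastD "") := by
  induction c with
  | nil => intro acc _; rfl
  | cons x c ih =>
    intro acc hacc
    simp only [List.foldl_cons]
    rw [ih (pvIns x acc) (pv_ins_pairwise x acc hacc),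
        pv_getLastD_ins acc hacc x "" (pv_len_nonneg x)]

lemma pv_key (row : List (String × String)) :
    derive_school_name_py row
      = (PySem.List.sorted ((row.map (fun kv => PySem.Str.strip kv.2)).filter pvOk)
          PySem.Str.len).getLastD "" := by
  unfold derive_school_name_py
  rw [pv_A_foldl, PySem.List.sorted_eq_foldl_insertBy]
  exact (pv_fold_ins _ [] (by simp)).symm

-- ===== VERDICT (by name: the statement is the Claim_ definition above) =====
theorem derive_school_name_py_spec : Claim_equal_derive_school_name_py := by
  intro row _
  show derive_school_name_py row = derive_school_name_py_alt row
  rw [pv_key]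
  unfold derive_school_name_py_alt
  by_cases h : PySem.List.sorted ((row.map (fun kv => PySem.Str.strip kv.2)).filter pvOk)
      PySem.Str.len = [] <;> simp [h]
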